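-- pv_equiv track=rewrite | github.com/mollinaca/competive_programing | AtCoder/code/practice/abc/abc192/c.py | g2
-- ===== SOURCE A (Python) =====
-- def g2(x:int):
--     x = sorted(str(x))
--     r = ''
--     for y in x:
--         if y == '0':
--             pass
--         else:
--             r += y
--     if not r:
--         r = '0'
--
--     return int(r)
-- ===== SOURCE B (Python) =====
-- def g2(x: int) -> int:
--     s = str(x)
--     cs = list(s)
--     digits = ''.join(d * cs.count(d) for d in '123456789')
--     if not digits:
--         digits = '0'
--     return int('-' + digits if s.startswith('-') else digits)
-- ===== Notes on version B (the rewrite author's own statement) =====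
-- stated objective: idiomatic
-- what changed: B drops A's sort-then-filter character loop and instead builds the result directly by counting: for each digit '1'..'9' it emits the digit repeated by its count in str(x) (zeros never emitted), prepending '-' when str(x) starts with it.
import Mathlib
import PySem

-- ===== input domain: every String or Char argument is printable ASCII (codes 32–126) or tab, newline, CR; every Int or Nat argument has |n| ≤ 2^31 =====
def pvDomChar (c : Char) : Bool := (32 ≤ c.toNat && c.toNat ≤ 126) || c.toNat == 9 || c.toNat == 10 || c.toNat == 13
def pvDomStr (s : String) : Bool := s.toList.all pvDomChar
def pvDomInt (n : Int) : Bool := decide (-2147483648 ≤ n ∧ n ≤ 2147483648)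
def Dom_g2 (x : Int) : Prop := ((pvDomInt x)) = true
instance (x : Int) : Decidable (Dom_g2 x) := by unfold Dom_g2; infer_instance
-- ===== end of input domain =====

-- B replaces A's sort-then-filter pass by a counting construction: it emits each digit
-- '1'..'9' repeated by its count in str(x), prepending '-' when present (objective: idiomatic).

-- ===== PORT A =====
-- sorted(str(x)); then the accumulation loop skipping '0'; '0' fallback; int(r).
-- int(r) never raises here (r is '0', digits, or '-' followed by digits), so .getD 0 is an
-- unreachable default.
def g2 (x : Int) : Int :=
  let xs := PySem.List.sorted (PySem.Int.toStr x).toList (fun c => c) false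
  let r := xs.foldl (fun r y => if y == '0' then r else r ++ [y]) ([] : List Char)
  let r := if r = [] then ['0'] else r
  (PySem.Int.ofChars? r).getD 0

-- ===== PORT B =====
-- ''.join(d * cs.count(d) for d in '123456789'); '0' fallback; sign via s.startswith('-');
-- same unreachable .getD 0 for int(...).
def g2_alt (x : Int) : Int :=
  let cs := (PySem.Int.toStr x).toList
  let digits := (['1','2','3','4','5','6','7','8','9'].map
      (fun d => List.replicate (cs.count d) d)).flatten
  let digits := if digits = [] then ['0'] else digits
  (PySem.Int.ofChars? (if PySem.Chars.startswith (PySem.Int.toStr x).toList ['-']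
      then '-' :: digits else digits)).getD 0

-- ===== PRECONDITION & SPEC =====
def Spec_g2 (x : Int) (out : Int) : Prop := out = g2_alt x
instance (x : Int) (out : Int) : Decidable (Spec_g2 x out) := by unfold Spec_g2; infer_instance

-- ===== CLAIM (what is proved, stated in full; the proofs are below) =====
def Claim_equal_g2 : Prop := ∀ (x : Int), Dom_g2 x → Spec_g2 x (g2 x)

-- ===== LEMMAS AND PROOFS =====

-- the ten digit characters, and the nonzero ones
def pvDigs : List Char := ['0','1','2','3','4','5','6','7','8','9']
def pvNZ : List Char := ['1','2','3','4','5','6','7','8','9']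
-- the full alphabet of str(x), in increasing code-point order
def pvAlpha : List Char := '-' :: pvDigs

lemma digitChar_mem (k : Nat) (hk : k < 10) : Nat.digitChar k ∈ pvDigs := by
  interval_cases k <;> decide

lemma digitChar_mem_nz (k : Nat) (h0 : 0 < k) (hk : k < 10) : Nat.digitChar k ∈ pvNZ := by
  interval_cases k <;> simp_all <;> decide

lemma tdc_mem (fuel : Nat) : ∀ (n : Nat) (acc : List Char) (c : Char),
    c ∈ Nat.toDigitsCore 10 fuel n acc → c ∈ acc ∨ c ∈ pvDigs := by
  induction fuel with
  | zero => intro n acc c h; exact Or.inl h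
  | succ fuel ih =>
    intro n acc c h
    rw [show Nat.toDigitsCore 10 (fuel+1) n acc
        = if n / 10 = 0 then Nat.digitChar (n % 10) :: acc
          else Nat.toDigitsCore 10 fuel (n / 10) (Nat.digitChar (n % 10) :: acc) from rfl] at h
    split at h
    · rcases List.mem_cons.mp h with h1 | h1
      · exact Or.inr (h1 ▸ digitChar_mem _ (Nat.mod_lt _ (by omega)))
      · exact Or.inl h1
    · rcases ih _ _ _ h with h1 | h1
      · rcases List.mem_cons.mp h1 with h2 | h2
        · exact Or.inr (h2 ▸ digitChar_mem _ (Nat.mod_lt _ (by omega)))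
        · exact Or.inl h2
      · exact Or.inr h1

lemma toDigits_mem (m : Nat) (c : Char) (h : c ∈ Nat.toDigits 10 m) : c ∈ pvDigs := by
  rcases tdc_mem (m+1) m [] c h with h1 | h1
  · simp at h1
  · exact h1

lemma tdc_nz (fuel : Nat) : ∀ (n : Nat) (acc : List Char), 0 < n → n < fuel →
    ∃ c ∈ pvNZ, c ∈ Nat.toDigitsCore 10 fuel n acc := by
  induction fuel with
  | zero => intro n acc h hf; omega
  | succ fuel ih =>
    intro n acc h hf
    rw [show Nat.toDigitsCore 10 (fuel+1) n acc
        = if n / 10 = 0 then Nat.digitChar (n % 10) :: acc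
          else Nat.toDigitsCore 10 fuel (n / 10) (Nat.digitChar (n % 10) :: acc) from rfl]
    split
    · rename_i h0
      have hn10 : n < 10 := by omega
      refine ⟨Nat.digitChar (n % 10), ?_, by simp⟩
      have : n % 10 = n := Nat.mod_eq_of_lt hn10
      rw [this]; exact digitChar_mem_nz n h hn10
    · rename_i h0
      have := ih (n / 10) (Nat.digitChar (n % 10) :: acc) (by omega) (by omega)
      exact this

lemma toDigits_nz (m : Nat) (h : 0 < m) : ∃ c ∈ pvNZ, c ∈ Nat.toDigits 10 m :=
  tdc_nz (m+1) m [] h (by omega)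

-- the canonical sorted arrangement: blocks of equal characters in alphabet order
lemma canon_count (cs : List Char) (a : Char) : ∀ (ds : List Char), ds.Nodup →
    ((ds.map (fun d => List.replicate (cs.count d) d)).flatten).count a
      = if a ∈ ds then cs.count a else 0 := by
  intro ds
  induction ds with
  | nil => simp
  | cons d ds ih =>
    intro hnd
    rcases List.nodup_cons.mp hnd with ⟨hd, hnd'⟩
    simp only [List.map_cons, List.flatten_cons, List.count_append, ih hnd',
      List.count_replicate, List.mem_cons]
    by_cases hda : a = d
    · subst hda
      simp [hd]
    · simp [Ne.symm hda, hda]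

lemma canon_perm (cs ds : List Char) (hnd : ds.Nodup) (hall : ∀ c ∈ cs, c ∈ ds) :
    ((ds.map (fun d => List.replicate (cs.count d) d)).flatten).Perm cs := by
  rw [List.perm_iff_count]
  intro a
  rw [canon_count cs a ds hnd]
  split
  · rfl
  · rename_i ha
    exact (List.count_eq_zero.mpr (fun hmem => ha (hall a hmem))).symm

lemma canon_pairwise (cs : List Char) : ∀ (ds : List Char), ds.Pairwise (· < ·) →
    ((ds.map (fun d => List.replicate (cs.count d) d)).flatten).Pairwise (· ≤ ·) := by
  intro ds
  induction ds with
  | nil => simp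
  | cons d ds ih =>
    intro hp
    rcases List.pairwise_cons.mp hp with ⟨hd, hp'⟩
    simp only [List.map_cons, List.flatten_cons]
    apply List.pairwise_append.mpr
    refine ⟨?_, ih hp', ?_⟩
    · rcases List.pairwise_replicate.mpr (Or.inr (le_refl d)) with h; exact h
    · intro a ha b hb
      have ha' : a = d := List.eq_of_mem_replicate ha
      rcases List.mem_flatten.mp hb with ⟨l, hl, hbl⟩
      rcases List.mem_map.mp hl with ⟨d', hd', rfl⟩
      have hb' : b = d' := List.eq_of_mem_replicate hbl
      subst ha'; subst hb'
      exact le_of_lt (hd _ hd')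

lemma foldA (l : List Char) : ∀ (acc : List Char),
    l.foldl (fun r y => if y == '0' then r else r ++ [y]) acc
      = acc ++ l.filter (fun y => !(y == '0')) := by
  induction l with
  | nil => simp
  | cons c l ih =>
    intro acc
    by_cases h : c = '0'
    · subst h
      rw [List.foldl_cons, if_pos (by rfl), ih, List.filter_cons]
      simp
    · rw [List.foldl_cons, if_neg (by simpa using h), ih, List.filter_cons,
        show (!(c == '0')) = true by simpa using h]
      simp

-- the common digit-block string of cs
def pvBlocks (cs : List Char) : List Char :=
  (pvNZ.map (fun d => List.replicate (cs.count d) d)).flatten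

lemma sorted_canon (cs : List Char) (hall : ∀ c ∈ cs, c ∈ pvAlpha) :
    PySem.List.sorted cs (fun c => c) false
      = (pvAlpha.map (fun d => List.replicate (cs.count d) d)).flatten :=
  PySem.List.sorted_id_eq_of_perm_of_pairwise cs _
    (canon_perm cs pvAlpha (by decide) hall)
    (canon_pairwise cs pvAlpha (by decide))

-- A's pre-fallback string: '-' count times '-' followed by the nonzero digit blocks
lemma strA_eq (cs : List Char) (hall : ∀ c ∈ cs, c ∈ pvAlpha) :
    (PySem.List.sorted cs (fun c => c) false).foldl
        (fun r y => if y == '0' then r else r ++ [y]) ([] : List Char)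
      = List.replicate (cs.count '-') '-' ++ pvBlocks cs := by
  rw [sorted_canon cs hall, foldA, List.nil_append]
  show ((pvAlpha.map (fun d => List.replicate (cs.count d) d)).flatten).filter _ = _
  simp only [pvAlpha, pvDigs, pvBlocks, pvNZ, List.map_cons, List.flatten_cons,
    List.filter_append, List.map_nil, List.flatten_nil, List.filter_nil]
  rw [List.filter_replicate, List.filter_replicate, List.filter_replicate,
    List.filter_replicate, List.filter_replicate, List.filter_replicate,
    List.filter_replicate, List.filter_replicate, List.filter_replicate,
    List.filter_replicate, List.filter_replicate]
  simp

lemma blocks_ne_nil (cs : List Char) (c : Char) (hc : c ∈ pvNZ) (hmem : c ∈ cs) :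
    pvBlocks cs ≠ [] := by
  intro h
  have hcnt : 0 < cs.count c := List.count_pos_iff.mpr hmem
  have : c ∈ pvBlocks cs := by
    apply List.mem_flatten.mpr
    exact ⟨List.replicate (cs.count c) c, List.mem_map.mpr ⟨c, hc, rfl⟩,
      List.mem_replicate.mpr ⟨by omega, rfl⟩⟩
  rw [h] at this
  simp at this

-- the two assembled strings coincide
lemma str_eq (x : Int) :
    (let r := (PySem.List.sorted (PySem.Int.toStr x).toList (fun c => c) false).foldl
        (fun r y => if y == '0' then r else r ++ [y]) ([] : List Char)
     if r = [] then ['0'] else r)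
    = (let cs := (PySem.Int.toStr x).toList
       let digits := pvBlocks cs
       let digits := if digits = [] then ['0'] else digits
       if PySem.Chars.startswith (PySem.Int.toStr x).toList ['-']
         then '-' :: digits else digits) := by
  have hT : (PySem.Int.toStr x).toList = PySem.Int.toChars x := PySem.Int.toList_toStr x
  by_cases hx : x < 0
  · -- cs = '-' :: toDigits 10 x.natAbs
    have hcs : (PySem.Int.toStr x).toList = '-' :: Nat.toDigits 10 x.natAbs := by
      rw [hT]; simp [PySem.Int.toChars, hx]
    have hall : ∀ c ∈ (PySem.Int.toStr x).toList, c ∈ pvAlpha := by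
      rw [hcs]; intro c hc
      rcases List.mem_cons.mp hc with rfl | hc
      · decide
      · exact List.mem_cons_of_mem _ (toDigits_mem _ _ hc)
    rw [strA_eq _ hall]
    have hnotd : ('-' : Char) ∉ Nat.toDigits 10 x.natAbs := by
      intro h; have := toDigits_mem _ _ h; simp [pvDigs] at this
    have hcount : ((PySem.Int.toStr x).toList).count '-' = 1 := by
      rw [hcs]; simp [List.count_eq_zero.mpr hnotd]
    rw [hcount]
    have hsw : PySem.Chars.startswith (PySem.Int.toStr x).toList ['-'] = true := by
      rw [hcs]; rfl
    rw [hsw]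
    -- the digit blocks are nonempty: x.natAbs > 0 has a nonzero digit
    obtain ⟨c, hcnz, hcmem⟩ := toDigits_nz x.natAbs (by omega)
    have hne : pvBlocks (PySem.Int.toStr x).toList ≠ [] :=
      blocks_ne_nil _ c hcnz (by rw [hcs]; exact List.mem_cons_of_mem _ hcmem)
    simp only [List.replicate, if_neg hne]
    simp
  · -- cs = toDigits 10 x.toNat : digit characters only
    have hcs : (PySem.Int.toStr x).toList = Nat.toDigits 10 x.toNat := by
      rw [hT]; simp [PySem.Int.toChars, hx]
    have hall : ∀ c ∈ (PySem.Int.toStr x).toList, c ∈ pvAlpha := by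
      rw [hcs]; intro c hc
      exact List.mem_cons_of_mem _ (toDigits_mem _ _ hc)
    rw [strA_eq _ hall]
    have hnotd : ('-' : Char) ∉ (PySem.Int.toStr x).toList := by
      rw [hcs]; intro h; have := toDigits_mem _ _ h; simp [pvDigs] at this
    have hcount : ((PySem.Int.toStr x).toList).count '-' = 0 :=
      List.count_eq_zero.mpr hnotd
    have hsw : PySem.Chars.startswith (PySem.Int.toStr x).toList ['-'] = false := by
      by_contra h
      have hb : PySem.Chars.startswith (PySem.Int.toStr x).toList ['-'] = true := by
        simpa using h
      have hpre : (['-'] : List Char) <+: (PySem.Int.toStr x).toList :=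
        List.isPrefixOf_iff_prefix.mp hb
      exact hnotd (hpre.subset (by simp))
    rw [hcount, hsw]
    simp

-- ===== VERDICT (by name: the statement is the Claim_ definition above) =====
theorem g2_spec : Claim_equal_g2 := by
  intro x _
  show g2 x = g2_alt x
  have h := str_eq x
  simp only [pvBlocks, pvNZ] at h
  exact congrArg (fun s => (PySem.Int.ofChars? s).getD 0) h
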